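-- pv_equiv track=rewrite | github.com/trissim/openhcs | openhcs/core/utils.py | _expand_col_pattern
-- ===== SOURCE A (Python) =====
-- from typing import Any, Callable, Dict, List, Optional, Union
-- from typing import List, Set, Union
--
-- def _expand_col_pattern(col_spec: str, available_wells: List[str]) -> Set[str]:
--     """Expand column pattern using available wells (format-agnostic)."""
--     # Parse column range
--     if "-" in col_spec:
--         start_col, end_col = map(int, col_spec.split("-"))
--         col_range = set(range(start_col, end_col + 1))
--     else:
--         col_range = {int(col_spec)}
--
--     # Extract numeric suffix and match (A01, B02, etc.)
--     def get_numeric_suffix(well: str) -> int: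
--         digits = ''.join(char for char in reversed(well) if char.isdigit())
--         return int(digits[::-1]) if digits else 0
--
--     result = {well for well in available_wells if get_numeric_suffix(well) in col_range}
--
--     # Opera Phenix format fallback (C01, C02, etc.)
--     if not result:
--         patterns = {f"C{col:02d}" for col in col_range}
--         result = {well for well in available_wells
--                  if any(pattern in well for pattern in patterns)}
--
--     return result
-- ===== SOURCE B (Python) =====
-- def _expand_col_pattern(col_spec, available_wells):
--     """Expand column pattern using available wells (format-agnostic)."""
--     # Normalize the spec to a pair of bounds, then one fused pass over the wells:
--     # each well is classified once, into the primary bucket (suffix inside the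
--     # interval) or the Opera Phenix fallback bucket (substring pattern match).
--     if "-" in col_spec:
--         lo_s, hi_s = col_spec.split("-")
--     else:
--         lo_s = hi_s = col_spec
--     lo, hi = int(lo_s), int(hi_s)
--
--     primary, fallback = set(), set()
--     for well in available_wells:
--         digits = ''.join(ch for ch in well if ch.isdigit())
--         suffix = int(digits) if digits else 0
--         if lo <= suffix <= hi:
--             primary.add(well)
--         elif any(("C%02d" % col) in well for col in range(lo, hi + 1)):
--             fallback.add(well)
--     return primary if primary else fallback
-- ===== Notes on version B (the rewrite author's own statement) =====
-- stated objective: alternative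
-- what changed: B replaces A's staged set comprehensions over a materialized range set with one fused pass over the wells that classifies each well exactly once into a primary bucket (interval test lo <= suffix <= hi) or a fallback bucket (patterns generated on the fly from the range), returning whichever bucket applies, and normalizes the spec to a bounds pair instead of building set(range(...)).
import Mathlib
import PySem

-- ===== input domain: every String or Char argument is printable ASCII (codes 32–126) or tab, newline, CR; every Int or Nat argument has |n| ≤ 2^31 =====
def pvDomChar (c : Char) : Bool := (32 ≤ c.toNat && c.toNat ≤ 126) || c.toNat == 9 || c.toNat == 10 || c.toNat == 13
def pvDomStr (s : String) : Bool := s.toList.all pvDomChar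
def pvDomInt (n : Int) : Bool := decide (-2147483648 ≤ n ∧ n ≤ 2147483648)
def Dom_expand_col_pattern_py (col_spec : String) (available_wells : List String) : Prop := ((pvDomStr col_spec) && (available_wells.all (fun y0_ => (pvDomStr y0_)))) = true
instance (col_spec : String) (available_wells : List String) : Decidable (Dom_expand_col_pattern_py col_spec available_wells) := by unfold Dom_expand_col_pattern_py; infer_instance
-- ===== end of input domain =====

-- B restructures A: the spec is normalized to a bounds pair (no materialized range set) and
-- ONE fused loop over the wells classifies each well once into a primary bucket (interval
-- test on the digit suffix) or a fallback bucket (patterns generated on the fly), returning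
-- whichever bucket applies, instead of A's staged set comprehensions.

-- ===== PORT A =====
-- f"C{col:02d}"  (= "C" + str(col).zfill(2))
def pyFmtC02 (col : Int) : String := "C" ++ PySem.Str.zfill (PySem.Int.toStr col) 2

-- A's nested helper get_numeric_suffix: digits collected from reversed(well), reversed back.
-- int() on a nonempty all-digit string always succeeds, so `.getD 0` is exact here.
def getNumericSuffixA (w : String) : Int :=
  let digits := (w.toList.reverse).filter PySem.Chars.isdigit
  if digits = [] then 0 else (PySem.Int.ofChars? digits.reverse).getD 0

def expand_col_pattern_py (col_spec : String) (available_wells : List String) : List String :=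
  let colRange : List Int :=
    if PySem.Str.isIn "-" col_spec then
      match PySem.Str.split? col_spec "-" with
      | some [a, b] =>
        match PySem.Int.ofStr? a, PySem.Int.ofStr? b with
        | some s, some e => PySem.Set.ofList (PySem.List.pyRange s (e + 1) 1)
        | _, _ => []      -- ValueError (outside Pre_)
      | _ => []           -- unpacking error / ValueError (outside Pre_)
    else
      match PySem.Int.ofStr? col_spec with
      | some v => [v]
      | none => []        -- ValueError (outside Pre_)
  let result := PySem.Set.ofList (available_wells.filter
      (fun w => colRange.contains (getNumericSuffixA w)))
  if result = [] then
    let patterns := PySem.Set.ofList (colRange.map pyFmtC02)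
    PySem.Set.ofList (available_wells.filter
      (fun w => patterns.any (fun p => PySem.Str.isIn p w)))
  else result

-- ===== PORT B =====
-- "C%02d" % col  (B's own formatting; same rendering rule)
def pyFmtC02B (col : Int) : String := "C" ++ PySem.Str.zfill (PySem.Int.toStr col) 2

-- B's suffix: digits collected in one forward pass (getD 0 exact as above).
def getNumericSuffixB (w : String) : Int :=
  let digits := w.toList.filter PySem.Chars.isdigit
  if digits = [] then 0 else (PySem.Int.ofChars? digits).getD 0

-- B's fused classifying pass: each well goes once into the primary or the fallback bucket
def runBucketsB (lo hi : Int) (wells : List String) : List String :=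
  let res := wells.foldl
    (fun (st : PySem.Set String × PySem.Set String) (w : String) =>
      if lo ≤ getNumericSuffixB w ∧ getNumericSuffixB w ≤ hi then
        (PySem.Set.add st.1 w, st.2)
      else if (PySem.List.pyRange lo (hi + 1) 1).any
          (fun col => PySem.Str.isIn (pyFmtC02B col) w) then
        (st.1, PySem.Set.add st.2 w)
      else st)
    (PySem.Set.empty, PySem.Set.empty)
  if res.1 = [] then res.2 else res.1

def expand_col_pattern_py_alt (col_spec : String) (available_wells : List String) : List String :=
  let bounds? : Option (String × String) :=
    if PySem.Str.isIn "-" col_spec then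
      (PySem.Str.split? col_spec "-").bind (fun ps =>
        if ps.length = 2 then some (ps.headD "", ps.getD 1 "")   -- `lo_s, hi_s = …` unpacks two
        else none)                                               -- unpacking error (outside Pre_)
    else some (col_spec, col_spec)
  (bounds?.bind (fun lh =>
    (PySem.Int.ofStr? lh.1).bind (fun lo =>
      (PySem.Int.ofStr? lh.2).map (fun hi =>
        runBucketsB lo hi available_wells)))).getD []            -- ValueError path (outside Pre_)

-- ===== PRECONDITION & SPEC =====
-- Pre_ excludes exactly the specs on which A raises ValueError: an unparsable int, or a
-- '-'-containing spec that does not split into exactly two parsable ints.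
def Pre_expand_col_pattern_py (col_spec : String) (available_wells : List String) : Prop :=
  (if PySem.Str.isIn "-" col_spec then
    let ps := (PySem.Str.split? col_spec "-").getD []
    ps.length == 2 && ps.all (fun p => (PySem.Int.ofStr? p).isSome)
  else (PySem.Int.ofStr? col_spec).isSome) = true
instance (col_spec : String) (available_wells : List String) : Decidable (Pre_expand_col_pattern_py col_spec available_wells) := by unfold Pre_expand_col_pattern_py; infer_instance

def pvWitness_expand_col_pattern_py : String × List String := ("2-5", ["A01", "B03", "C07"])

def Spec_expand_col_pattern_py (col_spec : String) (available_wells : List String) (out : List String) : Prop := out = expand_col_pattern_py_alt col_spec available_wells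
instance (col_spec : String) (available_wells : List String) (out : List String) : Decidable (Spec_expand_col_pattern_py col_spec available_wells out) := by unfold Spec_expand_col_pattern_py; infer_instance

-- ===== CLAIM (what is proved, stated in full; the proofs are below) =====
def Claim_equal_expand_col_pattern_py : Prop := ∀ (col_spec : String) (available_wells : List String), Dom_expand_col_pattern_py col_spec available_wells → Pre_expand_col_pattern_py col_spec available_wells → Spec_expand_col_pattern_py col_spec available_wells (expand_col_pattern_py col_spec available_wells)

-- ===== LEMMAS AND PROOFS =====

-- the two suffix helpers agree: filtering reversed(w) and reversing back is filtering w
theorem suffix_eq (w : String) : getNumericSuffixA w = getNumericSuffixB w := by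
  unfold getNumericSuffixA getNumericSuffixB
  simp [List.filter_reverse]

-- membership in the materialized range set is the interval test
theorem contains_range_eq (lo hi v : Int) :
    List.contains (PySem.Set.ofList (PySem.List.pyRange lo (hi + 1) 1)) v
      = decide (lo ≤ v ∧ v ≤ hi) := by
  simp [List.contains_eq_mem, PySem.Set.mem_ofList,
        PySem.List.mem_pyRange_iff_of_pos (by omega : (0:Int) < 1)]

-- any over the deduplicated pattern set is any over the range
theorem patterns_any_eq (lo hi : Int) (w : String) :
    (PySem.Set.ofList ((PySem.Set.ofList (PySem.List.pyRange lo (hi + 1) 1)).map pyFmtC02)).any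
        (fun p => PySem.Str.isIn p w)
      = (PySem.List.pyRange lo (hi + 1) 1).any (fun col => PySem.Str.isIn (pyFmtC02B col) w) := by
  rw [Bool.eq_iff_iff]
  simp only [List.any_eq_true, PySem.Set.mem_ofList, List.mem_map]
  constructor
  · rintro ⟨p, ⟨c, hc, rfl⟩, h⟩; exact ⟨c, hc, show PySem.Str.isIn (pyFmtC02B c) w = true from h⟩
  · rintro ⟨c, hc, h⟩; exact ⟨pyFmtC02 c, ⟨c, hc, rfl⟩, h⟩

-- a one-element range
theorem pyRange_singleton (v : Int) : PySem.List.pyRange v (v + 1) 1 = [v] := by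
  rw [PySem.List.pyRange_one_cons (by omega)]
  simp [PySem.List.pyRange]

-- a one-element column set: membership is the degenerate interval test
theorem contains_single_eq (v s : Int) : ([v].contains s) = decide (v ≤ s ∧ s ≤ v) := by
  rw [Bool.eq_iff_iff]; simp; omega

-- B's fused pair-fold splits into two independent conditional folds
theorem pair_fold (p q : String → Prop) [DecidablePred p] [DecidablePred q]
    (l : List String) (pr fb : PySem.Set String) :
    l.foldl
      (fun (st : PySem.Set String × PySem.Set String) (w : String) =>
        if p w then (PySem.Set.add st.1 w, st.2)
        else if q w then (st.1, PySem.Set.add st.2 w)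
        else st) (pr, fb)
    = (l.foldl (fun s w => if p w then PySem.Set.add s w else s) pr,
       l.foldl (fun s w => if ¬ p w ∧ q w then PySem.Set.add s w else s) fb) := by
  induction l generalizing pr fb with
  | nil => rfl
  | cons x xs ih =>
    by_cases hp : p x <;> by_cases hq : q x <;>
      simp [hp, hq, ih]

-- a conditional add-fold is the plain add-fold of the filtered list
theorem add_if_foldl (p : String → Prop) [DecidablePred p]
    (l : List String) (s0 : PySem.Set String) :
    l.foldl (fun s w => if p w then PySem.Set.add s w else s) s0
      = (l.filter (fun w => decide (p w))).foldl PySem.Set.add s0 := by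
  induction l generalizing s0 with
  | nil => rfl
  | cons x xs ih =>
    by_cases hp : p x <;> simp [hp, ih]

-- folding Set.add never empties a nonempty accumulator
theorem foldl_add_ne_nil (l : List String) (s : PySem.Set String) (h : s ≠ []) :
    l.foldl PySem.Set.add s ≠ [] := by
  induction l generalizing s with
  | nil => exact h
  | cons x xs ih =>
    apply ih
    unfold PySem.Set.add
    split
    · exact h
    · simp

-- set(xs) is empty only when xs is
theorem ofList_eq_nil (l : List String) (h : PySem.Set.ofList l = []) : l = [] := by
  cases l with
  | nil => rfl
  | cons x xs =>
    exfalso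
    apply foldl_add_ne_nil xs (PySem.Set.add PySem.Set.empty x)
    · unfold PySem.Set.add PySem.Set.empty
      simp
    · exact h

-- core equivalence of the two result-shaping strategies, for pointwise-equal tests
theorem core_eq (lo hi : Int) (wells : List String)
    (pa qa : String → Bool)
    (hp : ∀ w, pa w = decide (lo ≤ getNumericSuffixB w ∧ getNumericSuffixB w ≤ hi))
    (hq : ∀ w, qa w = (PySem.List.pyRange lo (hi + 1) 1).any
        (fun col => PySem.Str.isIn (pyFmtC02B col) w)) :
    (let result := PySem.Set.ofList (wells.filter pa)
     if result = [] then PySem.Set.ofList (wells.filter qa) else result)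
    = runBucketsB lo hi wells := by
  unfold runBucketsB
  rw [pair_fold (fun w => lo ≤ getNumericSuffixB w ∧ getNumericSuffixB w ≤ hi)
        (fun w => (PySem.List.pyRange lo (hi + 1) 1).any
          (fun col => PySem.Str.isIn (pyFmtC02B col) w) = true)]
  rw [add_if_foldl, add_if_foldl]
  have hprim : wells.filter pa
      = wells.filter (fun w => decide (lo ≤ getNumericSuffixB w ∧ getNumericSuffixB w ≤ hi)) := by
    apply List.filter_congr; intro w _; exact hp w
  simp only [PySem.Set.empty, ← PySem.Set.ofList_eq_foldl, ← hprim]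
  by_cases hres : PySem.Set.ofList (wells.filter pa) = []
  · have hfe : wells.filter pa = [] := ofList_eq_nil _ hres
    have hnone : ∀ w ∈ wells, pa w = false := by
      intro w hw
      by_contra hcontra
      have : w ∈ wells.filter pa := List.mem_filter.mpr ⟨hw, by simpa using hcontra⟩
      simp [hfe] at this
    rw [if_pos hres, if_pos hres]
    congr 1
    apply List.filter_congr
    intro w hw
    have hpw := hnone w hw
    rw [hp w] at hpw
    simp only [decide_eq_false_iff_not] at hpw
    simp [hq w, hpw]
  · rw [if_neg hres, if_neg hres]

-- ===== VERDICT (by name: the statement is the Claim_ definition above) =====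
theorem expand_col_pattern_py_spec : Claim_equal_expand_col_pattern_py := by
  intro col_spec available_wells _ hpre
  unfold Spec_expand_col_pattern_py expand_col_pattern_py
  unfold Pre_expand_col_pattern_py at hpre
  by_cases hdash : PySem.Str.isIn "-" col_spec = true
  · simp only [hdash, if_true] at hpre ⊢
    rcases hsplit : PySem.Str.split? col_spec "-" with _ | parts
    · rw [hsplit] at hpre; simp at hpre
    · rw [hsplit] at hpre
      simp only [Option.getD_some, Bool.and_eq_true, beq_iff_eq, List.all_eq_true] at hpre
      obtain ⟨hlen, hall⟩ := hpre
      obtain ⟨a, b, rfl⟩ := List.length_eq_two.mp hlen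
      have ha' := hall a (by simp)
      have hb' := hall b (by simp)
      rw [Option.isSome_iff_exists] at ha' hb'
      obtain ⟨lo, ha⟩ := ha'
      obtain ⟨hi, hb⟩ := hb'
      have hB : expand_col_pattern_py_alt col_spec available_wells
          = runBucketsB lo hi available_wells := by
        simp only [expand_col_pattern_py_alt, hdash, hsplit]
        simp [ha, hb]
      rw [hB]
      dsimp only
      simp only [ha, hb]
      exact core_eq lo hi available_wells _ _
        (fun w => by rw [contains_range_eq, suffix_eq])
        (fun w => patterns_any_eq lo hi w)
  · simp only [Bool.not_eq_true] at hdash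
    simp only [hdash, Bool.false_eq_true, if_false] at hpre ⊢
    simp only [Option.isSome_iff_exists] at hpre
    obtain ⟨v, hv⟩ := hpre
    have hB : expand_col_pattern_py_alt col_spec available_wells
        = runBucketsB v v available_wells := by
      simp only [expand_col_pattern_py_alt, hdash]
      simp [hv]
    rw [hB]
    simp only [hv]
    exact core_eq v v available_wells _ _
      (fun w => by rw [contains_single_eq, suffix_eq])
      (fun w => by
        rw [pyRange_singleton]
        simp [PySem.Set.ofList, pyFmtC02, pyFmtC02B])
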